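-- pv_equiv track=rewrite | github.com/pypi-data/pypi-mirror-362 | packages/svg-python/svg_python-0.0.10-py3-none-any.whl/pysvg/utils/matrix.py | add_matrix_border
-- ===== SOURCE A (Python) =====
-- from typing import Any, Literal
--
-- def add_matrix_border(
--     data: list[list[Any]],
--     pad_elem: Any,
--     mode: Literal["t", "b", "l", "r", "tb", "tl", "tr", "bl", "br", "tlr", "blr", "full"],
-- ) -> list[list[Any]]:
--     """
--     Add border to a matrix with specified padding element and mode.
--
--     Args:
--         data: Input matrix (list of list)
--         pad_elem: Element used for padding
--         mode: Padding mode
--             - t: top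
--             - b: bottom
--             - l: left
--             - r: right
--             - tb: top + bottom
--             - tl: top + left
--             - tr: top + right
--             - bl: bottom + left
--             - br: bottom + right
--             - tlr: top + left + right
--             - blr: bottom + left + right
--             - full: all four sides
--
--     Returns:
--         Matrix with added border
--
--     Example:
--         >>> matrix = [[1, 2], [3, 4]]
--         >>> add_matrix_border(matrix, 0, "full")
--         [[0, 0, 0, 0], [0, 1, 2, 0], [0, 3, 4, 0], [0, 0, 0, 0]]
--     """
--     if not data or not data[0]:
--         return data
--
--     # Deep copy original data
--     result = [row[:] for row in data]
--     rows = len(result)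
--     cols = len(result[0]) if result else 0
--
--     # Parse directions from mode
--     add_top = "t" in mode
--     add_bottom = "b" in mode
--     add_left = "l" in mode
--     add_right = "r" in mode
--
--     if mode == "full":
--         add_top = add_bottom = add_left = add_right = True
--
--     # Add left and right borders first (so we can calculate new column count correctly)
--     if add_left or add_right:
--         for i in range(rows):
--             if add_left:
--                 result[i] = [pad_elem] + result[i]
--             if add_right:
--                 result[i] = result[i] + [pad_elem]
--
--     # Update column count (since we may have added left/right borders)
--     new_cols = len(result[0]) if result else 0
--
--     # Add top border
--     if add_top:
--         top_row = [pad_elem] * new_cols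
--         result = [top_row] + result
--
--     # Add bottom border
--     if add_bottom:
--         bottom_row = [pad_elem] * new_cols
--         result = result + [bottom_row]
--
--     return result
-- ===== SOURCE B (Python) =====
-- def add_matrix_border(data, pad_elem, mode):
--     if not data or not data[0]:
--         return data
--     sides = set("tblr") if mode == "full" else set(mode)
--     top = 1 if "t" in sides else 0
--     bot = 1 if "b" in sides else 0
--     lpad = 1 if "l" in sides else 0
--     rpad = 1 if "r" in sides else 0
--     head_cols = lpad + len(data[0]) + rpad
--     out = []
--     for i in range(top + len(data) + bot):
--         k = i - top
--         if 0 <= k < len(data):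
--             row = data[k]
--             out.append([row[j - lpad] if 0 <= j - lpad < len(row) else pad_elem
--                         for j in range(lpad + len(row) + rpad)])
--         else:
--             out.append([pad_elem] * head_cols)
--     return out
-- ===== Notes on version B (the rewrite author's own statement) =====
-- stated objective: alternative
-- what changed: B constructs the output by coordinate mapping -- each output cell (i,j) is data[i-top][j-lpad] when the shifted indices are in range and pad_elem otherwise, with side flags read from a set of mode's characters -- instead of A's staged mutation of a copied matrix (per-row prepend/append passes, column recount, then row prepend/append).
import Mathlib
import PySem

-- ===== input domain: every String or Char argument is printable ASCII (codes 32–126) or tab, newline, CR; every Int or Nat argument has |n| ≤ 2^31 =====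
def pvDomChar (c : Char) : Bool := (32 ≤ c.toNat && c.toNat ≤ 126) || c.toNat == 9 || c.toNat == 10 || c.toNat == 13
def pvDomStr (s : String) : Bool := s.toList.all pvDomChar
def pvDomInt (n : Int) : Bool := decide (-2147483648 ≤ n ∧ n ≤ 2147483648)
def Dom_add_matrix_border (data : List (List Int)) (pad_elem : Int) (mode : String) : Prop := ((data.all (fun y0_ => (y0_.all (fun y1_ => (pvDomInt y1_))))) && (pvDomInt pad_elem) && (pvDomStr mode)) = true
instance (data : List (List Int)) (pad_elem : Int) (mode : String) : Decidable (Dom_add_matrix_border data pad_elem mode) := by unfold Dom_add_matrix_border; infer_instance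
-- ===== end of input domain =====

-- B builds the bordered matrix by coordinate mapping: out[i][j] is data[i-top][j-lpad] when those shifted
-- indices are in range and pad_elem otherwise, with side flags read from a set of mode's characters;
-- A instead mutates a copied matrix in staged passes. Objective: alternative construction, same cost.


-- ===== PORT A =====
def add_matrix_border (data : List (List Int)) (pad_elem : Int) (mode : String) : List (List Int) :=
  if data = [] ∨ data.headD [] = [] then data
  else
    let result := data.map (fun row => row)
    let addTop0 := PySem.Str.isIn "t" mode
    let addBottom0 := PySem.Str.isIn "b" mode
    let addLeft0 := PySem.Str.isIn "l" mode
    let addRight0 := PySem.Str.isIn "r" mode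
    let addTop := if mode = "full" then true else addTop0
    let addBottom := if mode = "full" then true else addBottom0
    let addLeft := if mode = "full" then true else addLeft0
    let addRight := if mode = "full" then true else addRight0
    let result :=
      if addLeft || addRight then
        result.map (fun r =>
          let r := if addLeft then pad_elem :: r else r
          if addRight then r ++ [pad_elem] else r)
      else result
    let newCols := (result.headD []).length
    let result := if addTop then List.replicate newCols pad_elem :: result else result
    let result := if addBottom then result ++ [List.replicate newCols pad_elem] else result
    result

-- ===== PORT B =====
def add_matrix_border_alt (data : List (List Int)) (pad_elem : Int) (mode : String) : List (List Int) :=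
  if data = [] ∨ data.headD [] = [] then data
  else
    let sides : PySem.Set Char :=
      if mode = "full" then PySem.Set.ofList ['t', 'b', 'l', 'r'] else PySem.Set.ofList mode.toList
    let top : Nat := if PySem.Set.contains sides 't' then 1 else 0
    let bot : Nat := if PySem.Set.contains sides 'b' then 1 else 0
    let lpad : Nat := if PySem.Set.contains sides 'l' then 1 else 0
    let rpad : Nat := if PySem.Set.contains sides 'r' then 1 else 0
    let headCols := lpad + (data.headD []).length + rpad
    (List.range (top + data.length + bot)).map (fun i =>
      if top ≤ i ∧ i - top < data.length then
        let row := data.getD (i - top) []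
        (List.range (lpad + row.length + rpad)).map (fun j =>
          if lpad ≤ j ∧ j - lpad < row.length then row.getD (j - lpad) pad_elem else pad_elem)
      else List.replicate headCols pad_elem)

-- ===== PRECONDITION & SPEC =====
def Spec_add_matrix_border (data : List (List Int)) (pad_elem : Int) (mode : String) (out : List (List Int)) : Prop := out = add_matrix_border_alt data pad_elem mode
instance (data : List (List Int)) (pad_elem : Int) (mode : String) (out : List (List Int)) : Decidable (Spec_add_matrix_border data pad_elem mode out) := by unfold Spec_add_matrix_border; infer_instance

-- ===== CLAIM (what is proved, stated in full; the proofs are below) =====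
def Claim_equal_add_matrix_border : Prop := ∀ (data : List (List Int)) (pad_elem : Int) (mode : String), Dom_add_matrix_border data pad_elem mode → Spec_add_matrix_border data pad_elem mode (add_matrix_border data pad_elem mode)

-- ===== LEMMAS AND PROOFS =====

-- out-of-range indices of the shifted range map to the pad value, in-range ones to g of the element
theorem rangeShiftMap {α β : Type} (xs : List α) (d : α) (t b : Nat) (g : α → β) (p : β) :
    (List.range (t + xs.length + b)).map
      (fun i => if t ≤ i ∧ i - t < xs.length then g (xs.getD (i - t) d) else p)
    = List.replicate t p ++ xs.map g ++ List.replicate b p := by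
  apply List.ext_getElem
  · simp; omega
  · intro i h1 h2
    simp only [List.length_map, List.length_range, List.length_append,
      List.length_replicate] at h1 h2
    simp only [List.getElem_map, List.getElem_range, List.getElem_append,
      List.length_replicate, List.length_map, List.length_append, List.getElem_replicate]
    split_ifs with h3 h4 h5 <;>
      first
        | rfl
        | omega
        | (rw [List.getD_eq_getElem xs d (by omega)])

theorem singleton_isIn (c : Char) (s : List Char) :
    PySem.Chars.isIn [c] s = s.contains c := by
  by_cases h : c ∈ s
  · rw [(PySem.Chars.isIn_iff_infix [c] s).mpr ((List.singleton_infix_iff c s).mpr h),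
      List.contains_iff_mem.mpr h]
  · rw [(PySem.Chars.isIn_eq_false_iff [c] s).mpr
      (by simpa [List.singleton_infix_iff] using h)]
    symm
    simpa using h

-- inner instance: identity padding of a single row
theorem rangeShiftMapId {α : Type} (xs : List α) (t b : Nat) (p : α) :
    (List.range (t + xs.length + b)).map
      (fun i => if t ≤ i ∧ i - t < xs.length then xs.getD (i - t) p else p)
    = List.replicate t p ++ xs ++ List.replicate b p := by
  simpa using rangeShiftMap xs p t b id p

-- the whole coordinate-mapped output is pad rows around the padded original rows
theorem outerEq (xs : List (List Int)) (pad : Int) (t b l r hc : Nat) :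
    (List.range (t + xs.length + b)).map (fun i =>
      if t ≤ i ∧ i - t < xs.length then
        (List.range (l + (xs.getD (i - t) []).length + r)).map (fun j =>
          if l ≤ j ∧ j - l < (xs.getD (i - t) []).length then (xs.getD (i - t) []).getD (j - l) pad
          else pad)
      else List.replicate hc pad)
    = List.replicate t (List.replicate hc pad) ++
        xs.map (fun row => List.replicate l pad ++ row ++ List.replicate r pad) ++
        List.replicate b (List.replicate hc pad) := by
  rw [rangeShiftMap xs [] t b
    (fun row => (List.range (l + row.length + r)).map (fun j =>
      if l ≤ j ∧ j - l < row.length then row.getD (j - l) pad else pad))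
    (List.replicate hc pad)]
  simp only [rangeShiftMapId]

-- ===== VERDICT (by name: the statement is the Claim_ definition above) =====
theorem add_matrix_border_spec : Claim_equal_add_matrix_border := by
  intro data pad_elem mode _
  unfold Spec_add_matrix_border add_matrix_border add_matrix_border_alt
  by_cases hguard : data = [] ∨ data.headD [] = []
  · rw [if_pos hguard, if_pos hguard]
  · rw [if_neg hguard, if_neg hguard]
    obtain ⟨d, ds, rfl⟩ : ∃ d ds, data = d :: ds := by
      cases data with
      | nil => exact absurd (Or.inl rfl) hguard
      | cons d ds => exact ⟨d, ds, rfl⟩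
    simp only []
    rw [outerEq]
    by_cases hf : mode = "full" <;>
      by_cases hT : 't' ∈ mode.toList <;>
      by_cases hB : 'b' ∈ mode.toList <;>
      by_cases hL : 'l' ∈ mode.toList <;>
      by_cases hR : 'r' ∈ mode.toList <;>
      simp [hf, singleton_isIn, hT, hB, hL, hR, List.replicate_succ, Nat.add_comm]
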